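-- pv_equiv track=rewrite | github.com/gianmillare/Codewars | python/7_kyu/simple_string_reversal_II.py | solve
-- ===== SOURCE A (Python) =====
-- def solve(st,a,b):
--     first = []
--     last = []
--     rev = []
--
--     for i in range(0, len(st)):
--         if i < a:
--             first.append(st[i])
--         elif a <= i <= b:
--             rev.append(st[i])
--         else:
--             last.append(st[i])
--
--     rev.reverse()
--
--     x = ''.join(first)
--     y = ''.join(rev)
--     z = ''.join(last)
--
--     return x + y + z
-- ===== SOURCE B (Python) =====
-- def solve(st, a, b):
--     lo = max(a, 0)
--     hi = max(b + 1, lo)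
--     return st[:lo] + st[lo:hi][::-1] + st[hi:]
-- ===== Notes on version B (the rewrite author's own statement) =====
-- stated objective: simpler
-- what changed: Replaced A's per-index loop that classifies every character into three buckets with direct slice arithmetic: prefix + reversed middle + suffix, with the two bounds clamped (lo=max(a,0), hi=max(b+1,lo)) exactly as the loop's comparisons clamp them. Slicing does the copying in C instead of a per-character Python loop.
import Mathlib
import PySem

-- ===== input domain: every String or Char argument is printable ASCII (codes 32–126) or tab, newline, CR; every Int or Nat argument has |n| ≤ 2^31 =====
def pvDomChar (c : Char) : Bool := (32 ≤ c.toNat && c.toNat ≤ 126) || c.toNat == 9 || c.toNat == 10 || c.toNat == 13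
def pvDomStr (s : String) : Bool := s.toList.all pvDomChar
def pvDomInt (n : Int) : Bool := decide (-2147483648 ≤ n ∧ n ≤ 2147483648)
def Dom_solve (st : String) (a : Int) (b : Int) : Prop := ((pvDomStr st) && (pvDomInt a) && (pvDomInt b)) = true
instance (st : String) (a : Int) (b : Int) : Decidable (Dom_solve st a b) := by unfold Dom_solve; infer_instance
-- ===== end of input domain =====

-- B replaces A's per-index three-bucket classification loop by direct slice arithmetic
-- (prefix + reversed middle + suffix, with the bounds clamped the way the loop's
-- comparisons clamp them); objective: simpler. Return values agree on all inputs.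

-- ===== PORT A =====
-- loop body of A: classify index i into (first, rev, last)
def solveStep (l : List Char) (a : Int) (b : Int)
    (acc : List Char × List Char × List Char) (i : Int) :
    List Char × List Char × List Char :=
  let c := PySem.List.pyGetD l i ' '
  if i < a then (acc.1 ++ [c], acc.2.1, acc.2.2)
  else if a ≤ i ∧ i ≤ b then (acc.1, acc.2.1 ++ [c], acc.2.2)
  else (acc.1, acc.2.1, acc.2.2 ++ [c])

def solve (st : String) (a : Int) (b : Int) : String :=
  let l := st.toList
  let r := (PySem.List.pyRange 0 (l.length : Int) 1).foldl (solveStep l a b) ([], [], [])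
  String.ofList r.1 ++ String.ofList r.2.1.reverse ++ String.ofList r.2.2

-- ===== PORT B =====
def solve_alt (st : String) (a : Int) (b : Int) : String :=
  let l := st.toList
  let lo := max a 0
  let hi := max (b + 1) lo
  String.ofList (PySem.List.slice l none (some lo)) ++
  String.ofList (PySem.List.slice l (some lo) (some hi)).reverse ++
  String.ofList (PySem.List.slice l (some hi) none)

-- ===== PRECONDITION & SPEC =====
def Spec_solve (st : String) (a : Int) (b : Int) (out : String) : Prop := out = solve_alt st a b
instance (st : String) (a : Int) (b : Int) (out : String) : Decidable (Spec_solve st a b out) := by unfold Spec_solve; infer_instance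

-- ===== CLAIM (what is proved, stated in full; the proofs are below) =====
def Claim_equal_solve : Prop := ∀ (st : String) (a : Int) (b : Int), Dom_solve st a b → Spec_solve st a b (solve st a b)

-- ===== LEMMAS AND PROOFS =====

-- Invariant of A's loop: after processing indices 0..n-1, the three buckets are
-- the (clamped) prefix, the middle slice collected in order, and the suffix,
-- where L = max(a,0) and H = max(b+1, max(a,0)) as Nats.
theorem solve_loop_inv (l : List Char) (a b : Int) (n : Nat) (hn : n ≤ l.length) :
    (PySem.List.pyRange 0 (n : Int) 1).foldl (solveStep l a b) ([], [], []) =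
      (l.take (min n (max a 0).toNat),
       (l.drop (max a 0).toNat).take (min n (max (b + 1) (max a 0)).toNat - (max a 0).toNat),
       (l.drop (max (b + 1) (max a 0)).toNat).take (n - (max (b + 1) (max a 0)).toNat)) := by
  set L := (max a 0).toNat with hL
  set H := (max (b + 1) (max a 0)).toNat with hH
  have hLH : L ≤ H := by omega
  induction n with
  | zero => simp
  | succ n ih =>
    have hn' : n ≤ l.length := by omega
    have hlt : n < l.length := by omega
    have hstep : (PySem.List.pyRange 0 ((n + 1 : Nat) : Int) 1) =
        PySem.List.pyRange 0 (n : Int) 1 ++ [(n : Int)] := by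
      push_cast
      exact PySem.List.pyRange_one_succ_right (by positivity)
    rw [hstep, List.foldl_append, ih hn']
    simp only [List.foldl_cons, List.foldl_nil, solveStep]
    have hc : PySem.List.pyGetD l (n : Int) ' ' = l[n] := by
      simp [PySem.List.pyGetD_natCast, hlt]
    rw [hc]
    by_cases h1 : (n : Int) < a
    · -- index goes to first; n < L
      have hnL : n < L := by omega
      simp only [if_pos h1]
      refine Prod.ext ?_ (Prod.ext ?_ ?_) <;> simp only
      · rw [min_eq_left (by omega), min_eq_left (by omega),
          List.take_add_one, List.getElem?_eq_getElem hlt]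
        simp
      · congr 1; omega
      · congr 1; omega
    · by_cases h2 : a ≤ (n : Int) ∧ (n : Int) ≤ b
      · -- index goes to rev; L ≤ n < H
        have hLn : L ≤ n := by omega
        have hnH : n < H := by omega
        simp only [if_neg h1, if_pos h2]
        refine Prod.ext ?_ (Prod.ext ?_ ?_) <;> simp only
        · congr 1; omega
        · rw [min_eq_left (by omega), min_eq_left (by omega)]
          have hlt' : n - L < (l.drop L).length := by simp; omega
          rw [show n + 1 - L = (n - L) + 1 by omega,
            List.take_add_one, List.getElem?_eq_getElem hlt']
          simp [List.getElem_drop]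
          congr 1
          omega
        · congr 1; omega
      · -- index goes to last; H ≤ n
        have hHn : H ≤ n := by omega
        simp only [if_neg h1, if_neg h2]
        refine Prod.ext ?_ (Prod.ext ?_ ?_) <;> simp only
        · congr 1; omega
        · congr 1; omega
        · have hlt' : n - H < (l.drop H).length := by simp; omega
          rw [show n + 1 - H = (n - H) + 1 by omega,
            List.take_add_one, List.getElem?_eq_getElem hlt']
          simp [List.getElem_drop]
          congr 1
          omega

-- ===== VERDICT (by name: the statement is the Claim_ definition above) =====
theorem solve_spec : Claim_equal_solve := by
  intro st a b _
  unfold Spec_solve solve solve_alt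
  simp only
  set l := st.toList
  set L := (max a 0).toNat with hL
  set H := (max (b + 1) (max a 0)).toNat with hH
  have hLH : L ≤ H := by omega
  rw [solve_loop_inv l a b l.length le_rfl]
  simp only []
  rw [PySem.List.slice_to l (by omega), PySem.List.slice_from l (by omega),
    PySem.List.slice_toNat l (by omega) (by omega)]
  have hcastL : (max a 0).toNat = L := rfl
  have hcastH : (max (b + 1) (max a 0)).toNat = H := rfl
  congr 2
  · rw [hcastL]
    by_cases h : L ≤ l.length
    · rw [min_eq_right h]
    · rw [min_eq_left (by omega), List.take_of_length_le (by omega),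
        List.take_of_length_le (by omega)]
  · rw [hcastL, hcastH]
    by_cases h : H ≤ l.length
    · rw [min_eq_right h]
    · rw [min_eq_left (by omega)]
      have hlen : (l.drop L).length = l.length - L := by simp
      rw [List.take_of_length_le (by omega), List.take_of_length_le (by omega)]
  · rw [hcastH]
    exact List.take_of_length_le (by simp)
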